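-- pv_equiv track=rewrite | github.com/Lucent-Snow/lark-multibitale-multiagent | src/agent_team_v2/demo.py | select_agent_team_v2_workers
-- ===== SOURCE A (Python) =====
-- V2_WORKERS = [
--     ("researcher-1", "researcher"),
--     ("editor-1", "editor"),
--     ("analyst-1", "analyst"),
--     ("reviewer-1", "reviewer"),
--     ("manager-1", "manager"),
-- ]
--
-- def select_agent_team_v2_workers(workers: int) -> list[tuple[str, str]]:
--     """Select workers while always keeping a manager fallback and covering all specialist roles."""
--     if workers <= 0:
--         return [("manager-1", "manager")]
--     if workers == 1:
--         return [("manager-1", "manager")]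
--     if workers >= len(V2_WORKERS):
--         return list(V2_WORKERS)
--     specialists = [w for w in V2_WORKERS if w[1] != "manager"]
--     specialist_roles = len({w[1] for w in specialists})
--     specialist_slots = workers - 1
--     if specialist_slots >= specialist_roles:
--         return specialists[:specialist_slots] + [("manager-1", "manager")]
--     seen_roles = set()
--     picked = []
--     for w in specialists:
--         if w[1] not in seen_roles:
--             picked.append(w)
--             seen_roles.add(w[1])
--     for w in specialists:
--         if w not in picked and len(picked) < specialist_slots:
--             picked.append(w)
--     return picked[:specialist_slots] + [("manager-1", "manager")]
-- ===== SOURCE B (Python) =====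
-- V2_WORKERS = [
--     ("researcher-1", "researcher"),
--     ("editor-1", "editor"),
--     ("analyst-1", "analyst"),
--     ("reviewer-1", "reviewer"),
--     ("manager-1", "manager"),
-- ]
--
-- def select_agent_team_v2_workers(workers: int) -> list[tuple[str, str]]:
--     specialists = [w for w in V2_WORKERS if w[1] != "manager"]
--     k = max(0, min(workers - 1, len(specialists)))
--     return specialists[:k] + [("manager-1", "manager")]
-- ===== Notes on version B (the rewrite author's own statement) =====
-- stated objective: simpler
-- what changed: Replaced the four guard branches, the role-set count and the two dedup loops with a single arithmetic clamp k = max(0, min(workers-1, len(specialists))) and one slice; correct because the specialist roles in V2_WORKERS are all distinct, so A's dedup loops always pick the whole prefix anyway.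
import Mathlib
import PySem

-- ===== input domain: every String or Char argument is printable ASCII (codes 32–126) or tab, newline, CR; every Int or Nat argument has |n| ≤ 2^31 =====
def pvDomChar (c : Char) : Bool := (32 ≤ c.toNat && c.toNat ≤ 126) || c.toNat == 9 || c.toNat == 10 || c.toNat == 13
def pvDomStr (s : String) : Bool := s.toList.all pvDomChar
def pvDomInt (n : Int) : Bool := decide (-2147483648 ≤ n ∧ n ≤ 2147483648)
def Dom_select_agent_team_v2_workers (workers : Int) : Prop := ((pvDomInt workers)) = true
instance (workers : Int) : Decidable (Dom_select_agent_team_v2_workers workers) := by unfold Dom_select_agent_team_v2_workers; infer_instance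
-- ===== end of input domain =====

-- B replaces A's guard branches and two role-dedup loops with one arithmetic clamp and one slice (objective: simpler).

-- ===== PORT A =====
def V2_WORKERS : List (String × String) :=
  [("researcher-1", "researcher"), ("editor-1", "editor"), ("analyst-1", "analyst"),
   ("reviewer-1", "reviewer"), ("manager-1", "manager")]

def select_agent_team_v2_workers (workers : Int) : List (String × String) :=
  if workers ≤ 0 then [("manager-1", "manager")]
  else if workers = 1 then [("manager-1", "manager")]
  else if workers ≥ (V2_WORKERS.length : Int) then V2_WORKERS
  else
    let specialists := V2_WORKERS.filter (fun w => w.2 ≠ "manager")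
    let specialist_roles : Int := ((PySem.Set.ofList (specialists.map (·.2))).length : Int)
    let specialist_slots := workers - 1
    if specialist_slots ≥ specialist_roles then
      PySem.List.slice specialists none (some specialist_slots) ++ [("manager-1", "manager")]
    else
      -- first loop: pick one worker per unseen role
      let sp := specialists.foldl (fun (st : PySem.Set String × List (String × String)) w =>
        if w.2 ∉ st.1 then (st.1.add w.2, st.2 ++ [w]) else st) (PySem.Set.ofList [], [])
      -- second loop: fill remaining slots with workers not yet picked
      let picked := specialists.foldl (fun (picked : List (String × String)) w =>
        if w ∉ picked ∧ (picked.length : Int) < specialist_slots then picked ++ [w] else picked) sp.2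
      PySem.List.slice picked none (some specialist_slots) ++ [("manager-1", "manager")]

-- ===== PORT B =====
def select_agent_team_v2_workers_alt (workers : Int) : List (String × String) :=
  let specialists := V2_WORKERS.filter (fun w => w.2 ≠ "manager")
  let k := max 0 (min (workers - 1) (specialists.length : Int))
  PySem.List.slice specialists none (some k) ++ [("manager-1", "manager")]

-- ===== PRECONDITION & SPEC =====
def Spec_select_agent_team_v2_workers (workers : Int) (out : List (String × String)) : Prop := out = select_agent_team_v2_workers_alt workers
instance (workers : Int) (out : List (String × String)) : Decidable (Spec_select_agent_team_v2_workers workers out) := by unfold Spec_select_agent_team_v2_workers; infer_instance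

-- ===== CLAIM (what is proved, stated in full; the proofs are below) =====
def Claim_equal_select_agent_team_v2_workers : Prop := ∀ (workers : Int), Dom_select_agent_team_v2_workers workers → Spec_select_agent_team_v2_workers workers (select_agent_team_v2_workers workers)

-- ===== LEMMAS AND PROOFS =====

-- slice with a nonnegative bound is a take
lemma slice_nonneg (xs : List (String × String)) (k : Int) (h : 0 ≤ k) :
    PySem.List.slice xs none (some k) = xs.take k.toNat := by
  obtain ⟨n, rfl⟩ := Int.eq_ofNat_of_zero_le h
  rw [PySem.List.slice_to_natCast]
  simp

lemma alt_eval (workers : Int) :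
    select_agent_team_v2_workers_alt workers =
      (V2_WORKERS.filter (fun w => w.2 ≠ "manager")).take (max 0 (min (workers - 1) 4)).toNat
        ++ [("manager-1", "manager")] := by
  show PySem.List.slice _ none (some _) ++ _ = _
  rw [slice_nonneg _ _ (le_max_left 0 _)]
  rfl

-- ===== VERDICT (by name: the statement is the Claim_ definition above) =====
theorem select_agent_team_v2_workers_spec : Claim_equal_select_agent_team_v2_workers := by
  intro workers _
  unfold Spec_select_agent_team_v2_workers
  rw [alt_eval]
  by_cases h0 : workers ≤ 0
  · have : (max 0 (min (workers - 1) 4)).toNat = 0 := by omega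
    rw [this]
    simp [select_agent_team_v2_workers, h0]
  · by_cases h1 : workers = 1
    · subst h1; decide
    · by_cases h5 : workers ≥ 5
      · have : (max 0 (min (workers - 1) 4)).toNat = 4 := by omega
        rw [this]
        simp only [select_agent_team_v2_workers, if_neg h0, if_neg h1]
        rw [if_pos (by simpa using h5)]
        rfl
      · -- workers ∈ {2, 3, 4}
        interval_cases workers <;> decide
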